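-- pv_equiv track=rewrite | github.com/david99inlinz-ai/openmorning | agents/economic_cycle.py | _analyze_juglar
-- ===== SOURCE A (Python) =====
-- from typing import Dict, Any
--
-- def _analyze_juglar(year: int) -> Dict[str, Any]:
--     """朱格拉周期分析（设备投资周期）"""
--     # 定义已知周期区间
--     JUGLAR_CYCLES = [
--         (2009, 2016, ["扩张", "扩张", "扩张", "顶部", "顶部", "收缩", "收缩"]),
--         (2016, 2023, ["扩张", "扩张", "扩张", "顶部", "顶部", "收缩", "收缩"]),
--         (2023, 2030, ["扩张", "扩张", "扩张", "顶部", "顶部", "收缩", "收缩"])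
--     ]
--
--     for start, end, phases in JUGLAR_CYCLES:
--         if start <= year < end:
--             idx = year - start
--             phase = phases[idx] if idx < len(phases) else "收缩"
--             signal = "bullish" if phase == "扩张" else ("neutral" if phase == "顶部" else "bearish")
--             return {
--                 "cycle": "朱格拉周期",
--                 "phase": phase,
--                 "signal": signal,
--                 "period": "7-11年"
--             }
--
--     # 超出已知区间
--     return {
--         "cycle": "朱格拉周期",
--         "phase": "unknown",
--         "signal": "neutral",
--         "period": "7-11年"
--     }
-- ===== SOURCE B (Python) =====
-- from typing import Dict, Any
--
-- _PATTERN = ["扩张", "扩张", "扩张", "顶部", "顶部", "收缩", "收缩"]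
-- _SIGNAL = {"扩张": "bullish", "顶部": "neutral", "收缩": "bearish"}
--
-- def _analyze_juglar(year: int) -> Dict[str, Any]:
--     """朱格拉周期分析（设备投资周期）— closed-form: one 7-year pattern with modular index."""
--     if 2009 <= year < 2030:
--         phase = _PATTERN[(year - 2009) % 7]
--         sig = _SIGNAL[phase]
--     else:
--         phase, sig = "unknown", "neutral"
--     return {
--         "cycle": "朱格拉周期",
--         "phase": phase,
--         "signal": sig,
--         "period": "7-11年",
--     }
-- ===== Notes on version B (the rewrite author's own statement) =====
-- stated objective: simpler
-- what changed: Replaced the linear scan over three identical cycle intervals with a single range test and a modular index into one shared phase pattern plus a phase-to-signal dict.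
import Mathlib
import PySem

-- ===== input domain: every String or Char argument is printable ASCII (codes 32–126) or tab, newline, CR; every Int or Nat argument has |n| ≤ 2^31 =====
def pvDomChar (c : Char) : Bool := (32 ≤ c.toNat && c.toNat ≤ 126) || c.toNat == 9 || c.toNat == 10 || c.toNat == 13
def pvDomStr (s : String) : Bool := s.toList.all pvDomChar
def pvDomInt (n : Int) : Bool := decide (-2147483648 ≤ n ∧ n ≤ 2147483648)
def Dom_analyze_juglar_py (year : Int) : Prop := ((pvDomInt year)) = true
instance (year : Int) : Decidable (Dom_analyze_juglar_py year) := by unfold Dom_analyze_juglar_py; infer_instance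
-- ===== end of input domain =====

-- B replaces A's scan over three identical cycle intervals by one range test and a modular
-- index into a single 7-element pattern (objective: simpler).

-- ===== PORT A =====
-- body of the for-loop for one matching cycle (start, end, phases); `phases[idx] if idx < len(phases) else "收缩"`
-- ported with pyGet?.getD: exact here because the branch is guarded by idx < len(phases).
def pvCycleBody (year start : Int) (phases : List String) : List (String × String) :=
  let idx := year - start
  let phase := if idx < (phases.length : Int) then (PySem.List.pyGet? phases idx).getD "收缩" else "收缩"
  let signal := if phase = "扩张" then "bullish" else (if phase = "顶部" then "neutral" else "bearish")
  [("cycle", "朱格拉周期"), ("phase", phase), ("signal", signal), ("period", "7-11年")]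

-- the for-loop over the literal 3-element JUGLAR_CYCLES list, unrolled with early returns
def analyze_juglar_py (year : Int) : List (String × String) :=
  let phases := ["扩张", "扩张", "扩张", "顶部", "顶部", "收缩", "收缩"]
  if 2009 ≤ year ∧ year < 2016 then pvCycleBody year 2009 phases
  else if 2016 ≤ year ∧ year < 2023 then pvCycleBody year 2016 phases
  else if 2023 ≤ year ∧ year < 2030 then pvCycleBody year 2023 phases
  else [("cycle", "朱格拉周期"), ("phase", "unknown"), ("signal", "neutral"), ("period", "7-11年")]

-- ===== PORT B =====
def pvPattern : List String := ["扩张", "扩张", "扩张", "顶部", "顶部", "收缩", "收缩"]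
def pvSignalDict : PySem.Dict String String :=
  PySem.Dict.ofList [("扩张", "bullish"), ("顶部", "neutral"), ("收缩", "bearish")]

def analyze_juglar_py_alt (year : Int) : List (String × String) :=
  -- _PATTERN[(year-2009)%7] and _SIGNAL[phase] never fail in Source B (index in 0..6, phase a key);
  -- getD is exact on this guarded branch.
  let (phase, signal) :=
    if 2009 ≤ year ∧ year < 2030 then
      let phase := (PySem.List.pyGet? pvPattern (PySem.Int.mod (year - 2009) 7)).getD ""
      (phase, (PySem.Dict.get? pvSignalDict phase).getD "")
    else ("unknown", "neutral")
  [("cycle", "朱格拉周期"), ("phase", phase), ("signal", signal), ("period", "7-11年")]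

-- ===== PRECONDITION & SPEC =====
def Spec_analyze_juglar_py (year : Int) (out : List (String × String)) : Prop := out = analyze_juglar_py_alt year
instance (year : Int) (out : List (String × String)) : Decidable (Spec_analyze_juglar_py year out) := by unfold Spec_analyze_juglar_py; infer_instance

-- ===== CLAIM (what is proved, stated in full; the proofs are below) =====
def Claim_equal_analyze_juglar_py : Prop := ∀ (year : Int), Dom_analyze_juglar_py year → Spec_analyze_juglar_py year (analyze_juglar_py year)

-- ===== LEMMAS AND PROOFS =====
lemma pv_in_range (year : Int) (h1 : 2009 ≤ year) (h2 : year < 2030) :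
    analyze_juglar_py year = analyze_juglar_py_alt year := by
  interval_cases year <;> decide

lemma pv_out_range (year : Int) (h : ¬ (2009 ≤ year ∧ year < 2030)) :
    analyze_juglar_py year = analyze_juglar_py_alt year := by
  unfold analyze_juglar_py analyze_juglar_py_alt
  split_ifs with h1 h2 h3 <;> first | rfl | omega

-- ===== VERDICT (by name: the statement is the Claim_ definition above) =====
theorem analyze_juglar_py_spec : Claim_equal_analyze_juglar_py := by
  intro year _
  unfold Spec_analyze_juglar_py
  by_cases h : 2009 ≤ year ∧ year < 2030
  · exact pv_in_range year h.1 h.2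
  · exact pv_out_range year h
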